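-- pv_equiv track=rewrite | github.com/linhdvu14/cp-sols | sols/CodeForces/2112_edu/B_Shrinking_Array.py | solve
-- ===== SOURCE A (Python) =====
-- INF = float('inf')
--
-- def solve(N, A):
--     res = INF
--     for i in range(N):
--         mn = mx = A[i]
--         for j in range(i, N):
--             mn = min(mn, A[j])
--             mx = max(mx, A[j])
--             if i and max(mn, A[i - 1] - 1) <= min(mx, A[i - 1] + 1): res = min(res, j - i)
--             if j + 1 < N and max(mn, A[j + 1] - 1) <= min(mx, A[j + 1] + 1): res = min(res, j - i)
--
--     return res if res < INF else -1
-- ===== SOURCE B (Python) =====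
-- def solve(N, A):
--     # answer is 0 if some adjacent pair differs by <= 1,
--     # else 1 if the profile has a local extremum (direction change),
--     # else the array is strictly monotone with gaps >= 2 and it is impossible.
--     for i in range(N - 1):
--         if abs(A[i] - A[i + 1]) <= 1:
--             return 0
--     for i in range(N - 2):
--         if (A[i] < A[i + 1]) != (A[i + 1] < A[i + 2]):
--             return 1
--     return -1
-- ===== Notes on version B (the rewrite author's own statement) =====
-- stated objective: faster
-- what changed: A scans all O(N^2) segments with running min/max to find the cheapest mergeable one; B uses the closed characterization that the answer is always 0 (some adjacent pair differs by <=1), 1 (a direction change exists in the profile) or -1 (strictly monotone with all gaps >=2), checked in one linear pass each.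
import Mathlib
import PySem

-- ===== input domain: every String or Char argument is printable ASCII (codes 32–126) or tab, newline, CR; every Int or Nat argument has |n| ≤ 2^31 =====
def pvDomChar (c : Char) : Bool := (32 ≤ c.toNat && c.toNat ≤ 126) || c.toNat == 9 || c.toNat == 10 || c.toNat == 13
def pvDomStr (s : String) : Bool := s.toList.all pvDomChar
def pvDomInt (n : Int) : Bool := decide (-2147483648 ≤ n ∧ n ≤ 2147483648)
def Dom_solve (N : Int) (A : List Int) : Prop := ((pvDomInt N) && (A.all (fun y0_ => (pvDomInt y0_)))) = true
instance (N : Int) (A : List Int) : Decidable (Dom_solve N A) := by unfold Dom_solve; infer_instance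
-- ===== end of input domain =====

-- B replaces A's O(N^2) scan of all segments by the closed characterization that the answer
-- is always 0, 1 or -1, decided by two linear passes; the return value is what is proved equal.

-- ===== PORT A =====
-- A's res starts as float INF; ported as Option Int (none = INF), since any returned res is an Int.
def pvOptMin (r : Option Int) (v : Int) : Option Int :=
  some (match r with | none => v | some x => min x v)

-- body of A's inner loop over j; state (mn, mx, res)
def pvStep (g : Int → Int) (N i : Int) (st : Int × Int × Option Int) (j : Int) :
    Int × Int × Option Int :=
  let mn := min st.1 (g j)
  let mx := max st.2.1 (g j)
  let r1 := if i ≠ 0 ∧ max mn (g (i-1) - 1) ≤ min mx (g (i-1) + 1)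
            then pvOptMin st.2.2 (j - i) else st.2.2
  let r2 := if j + 1 < N ∧ max mn (g (j+1) - 1) ≤ min mx (g (j+1) + 1)
            then pvOptMin r1 (j - i) else r1
  (mn, mx, r2)

-- A's outer-loop body: run the inner loop from i (mn = mx = A[i]), keep only res
def pvOuterStep (g : Int → Int) (N : Int) (res : Option Int) (i : Int) : Option Int :=
  ((PySem.List.pyRange i N 1).foldl (pvStep g N i) (g i, g i, res)).2.2

def solve (N : Int) (A : List Int) : Int :=
  let g := fun k => PySem.List.pyGetD A k 0   -- A[k]; Pre_solve keeps every access in range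
  match (PySem.List.pyRange 0 N 1).foldl (pvOuterStep g N) none with
  | some r => r
  | none => -1

-- ===== PORT B =====
def solve_alt (N : Int) (A : List Int) : Int :=
  let g := fun k => PySem.List.pyGetD A k 0
  if (PySem.List.pyRange 0 (N-1) 1).any (fun i => decide (|g i - g (i+1)| ≤ 1)) then 0
  else if (PySem.List.pyRange 0 (N-2) 1).any
      (fun i => decide (g i < g (i+1)) != decide (g (i+1) < g (i+2))) then 1
  else -1

-- ===== PRECONDITION & SPEC =====
-- Python A evaluates A[i] for every i in range(N) and raises IndexError when N > len(A);
-- exactly those inputs are excluded.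
def Pre_solve (N : Int) (A : List Int) : Prop := N ≤ (A.length : Int)
instance (N : Int) (A : List Int) : Decidable (Pre_solve N A) := by unfold Pre_solve; infer_instance
def pvWitness_solve : Int × List Int := (4, [5, 1, 9, 2])
def Spec_solve (N : Int) (A : List Int) (out : Int) : Prop := out = solve_alt N A
instance (N : Int) (A : List Int) (out : Int) : Decidable (Spec_solve N A out) := by unfold Spec_solve; infer_instance

-- ===== CLAIM (what is proved, stated in full; the proofs are below) =====
def Claim_equal_solve : Prop := ∀ (N : Int) (A : List Int), Dom_solve N A → Pre_solve N A → Spec_solve N A (solve N A)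

-- ===== LEMMAS AND PROOFS =====

-- segment minimum / maximum of g over [i..j] (the value of A's running mn/mx after step j)
def pvSmn (g : Int → Int) (i j : Int) : Int := ((PySem.List.pyRange i (j+1) 1).map g).foldl min (g i)
def pvSmx (g : Int → Int) (i j : Int) : Int := ((PySem.List.pyRange i (j+1) 1).map g).foldl max (g i)

-- the merge condition A tests for segment [i..j]
def pvCondb (g : Int → Int) (N i j : Int) : Bool :=
  decide ((i ≠ 0 ∧ max (pvSmn g i j) (g (i-1) - 1) ≤ min (pvSmx g i j) (g (i-1) + 1)) ∨
          (j + 1 < N ∧ max (pvSmn g i j) (g (j+1) - 1) ≤ min (pvSmx g i j) (g (j+1) + 1)))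

-- the res-component of A's inner loop, with mn/mx replaced by their closed forms
def pvCStep (g : Int → Int) (N i : Int) (r : Option Int) (j : Int) : Option Int :=
  if pvCondb g N i j then pvOptMin r (j - i) else r

-- all candidate segments (i, j)
def pvPairs (N : Int) : List (Int × Int) :=
  (PySem.List.pyRange 0 N 1).flatMap (fun i => (PySem.List.pyRange i N 1).map (fun j => (i, j)))

def pvF (g : Int → Int) (N : Int) (r : Option Int) (p : Int × Int) : Option Int :=
  if pvCondb g N p.1 p.2 then pvOptMin r (p.2 - p.1) else r

-- B's two tests as propositions
def pvAdj (g : Int → Int) (N : Int) : Prop := ∃ i, 0 ≤ i ∧ i < N - 1 ∧ |g i - g (i+1)| ≤ 1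
def pvExt (g : Int → Int) (N : Int) : Prop :=
  ∃ i, 0 ≤ i ∧ i < N - 2 ∧ ((g i < g (i+1)) ↔ ¬ (g (i+1) < g (i+2)))

@[simp] theorem pvOptMin_none (v : Int) : pvOptMin none v = some v := rfl
@[simp] theorem pvOptMin_some (x v : Int) : pvOptMin (some x) v = some (min x v) := rfl

theorem pvOptMin_idem (r : Option Int) (v : Int) : pvOptMin (pvOptMin r v) v = pvOptMin r v := by
  cases r <;> simp

theorem pvSmn_empty (g : Int → Int) {i j : Int} (h : j < i) : pvSmn g i j = g i := by
  unfold pvSmn; rw [PySem.List.pyRange_one_eq_nil (by omega : j + 1 ≤ i)]; rfl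

theorem pvSmx_empty (g : Int → Int) {i j : Int} (h : j < i) : pvSmx g i j = g i := by
  unfold pvSmx; rw [PySem.List.pyRange_one_eq_nil (by omega : j + 1 ≤ i)]; rfl

theorem pvSmn_self (g : Int → Int) (i : Int) : pvSmn g i i = g i := by
  unfold pvSmn; rw [PySem.List.pyRange_one_singleton]; simp

theorem pvSmx_self (g : Int → Int) (i : Int) : pvSmx g i i = g i := by
  unfold pvSmx; rw [PySem.List.pyRange_one_singleton]; simp

theorem pvSmn_succ (g : Int → Int) {i j : Int} (h : i ≤ j) :
    pvSmn g i (j+1) = min (pvSmn g i j) (g (j+1)) := by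
  unfold pvSmn
  rw [PySem.List.pyRange_one_succ_right (by omega : i ≤ j + 1), List.map_append, List.foldl_append]
  simp

theorem pvSmx_succ (g : Int → Int) {i j : Int} (h : i ≤ j) :
    pvSmx g i (j+1) = max (pvSmx g i j) (g (j+1)) := by
  unfold pvSmx
  rw [PySem.List.pyRange_one_succ_right (by omega : i ≤ j + 1), List.map_append, List.foldl_append]
  simp

theorem pvSmn_pair (g : Int → Int) (i : Int) : pvSmn g i (i+1) = min (g i) (g (i+1)) := by
  rw [pvSmn_succ g (le_refl i), pvSmn_self]

theorem pvSmx_pair (g : Int → Int) (i : Int) : pvSmx g i (i+1) = max (g i) (g (i+1)) := by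
  rw [pvSmx_succ g (le_refl i), pvSmx_self]

theorem pvSmn_mem (g : Int → Int) {i j : Int} (h : i ≤ j) :
    ∃ k, i ≤ k ∧ k ≤ j ∧ pvSmn g i j = g k := by
  rcases PySem.List.foldl_min_mem ((PySem.List.pyRange i (j+1) 1).map g) (g i) with h1 | h1
  · exact ⟨i, le_refl i, h, h1⟩
  · rcases List.mem_map.1 h1 with ⟨k, hk, hgk⟩
    rcases PySem.List.mem_pyRange_one.1 hk with ⟨hk1, hk2⟩
    exact ⟨k, hk1, by omega, hgk.symm⟩

theorem pvSmx_mem (g : Int → Int) {i j : Int} (h : i ≤ j) :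
    ∃ k, i ≤ k ∧ k ≤ j ∧ pvSmx g i j = g k := by
  rcases PySem.List.foldl_max_mem ((PySem.List.pyRange i (j+1) 1).map g) (g i) with h1 | h1
  · exact ⟨i, le_refl i, h, h1⟩
  · rcases List.mem_map.1 h1 with ⟨k, hk, hgk⟩
    rcases PySem.List.mem_pyRange_one.1 hk with ⟨hk1, hk2⟩
    exact ⟨k, hk1, by omega, hgk.symm⟩

-- one inner step, on the invariant state
theorem pvStep_char (g : Int → Int) (N i : Int) (r : Option Int) {j : Int} (h : i ≤ j) :
    pvStep g N i (pvSmn g i (j-1), pvSmx g i (j-1), r) j =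
      (pvSmn g i j, pvSmx g i j, pvCStep g N i r j) := by
  have hmn : min (pvSmn g i (j-1)) (g j) = pvSmn g i j := by
    rcases eq_or_lt_of_le h with heq | hlt
    · subst heq; rw [pvSmn_empty g (by omega : i - 1 < i), pvSmn_self]; simp
    · have h' : i ≤ j - 1 := by omega
      have := pvSmn_succ g h'
      rw [sub_add_cancel] at this
      omega
  have hmx : max (pvSmx g i (j-1)) (g j) = pvSmx g i j := by
    rcases eq_or_lt_of_le h with heq | hlt
    · subst heq; rw [pvSmx_empty g (by omega : i - 1 < i), pvSmx_self]; simp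
    · have h' : i ≤ j - 1 := by omega
      have := pvSmx_succ g h'
      rw [sub_add_cancel] at this
      omega
  simp only [pvStep, pvCStep, hmn, hmx, Prod.mk.injEq]
  refine ⟨trivial, trivial, ?_⟩
  by_cases hC1 : i ≠ 0 ∧ max (pvSmn g i j) (g (i-1) - 1) ≤ min (pvSmx g i j) (g (i-1) + 1) <;>
    by_cases hC2 : j + 1 < N ∧ max (pvSmn g i j) (g (j+1) - 1) ≤ min (pvSmx g i j) (g (j+1) + 1)
  · rw [if_pos hC1, if_pos hC2, if_pos (show pvCondb g N i j = true from decide_eq_true (Or.inl hC1))]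
    exact pvOptMin_idem r (j - i)
  · rw [if_neg hC2, if_pos hC1, if_pos (show pvCondb g N i j = true from decide_eq_true (Or.inl hC1))]
  · rw [if_pos hC2, if_neg hC1, if_pos (show pvCondb g N i j = true from decide_eq_true (Or.inr hC2))]
  · have hb : ¬ (pvCondb g N i j = true) := by
      simp only [pvCondb, decide_eq_true_eq]
      rintro (h' | h')
      · exact hC1 h'
      · exact hC2 h'
    rw [if_neg hC2, if_neg hC1, if_neg hb]

-- A's inner loop, characterized
theorem pvInner_char (g : Int → Int) (N i : Int) (res0 : Option Int) :
    ∀ m, i ≤ m →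
      (PySem.List.pyRange i m 1).foldl (pvStep g N i) (g i, g i, res0) =
        (pvSmn g i (m-1), pvSmx g i (m-1),
          (PySem.List.pyRange i m 1).foldl (pvCStep g N i) res0) := by
  intro m hm
  induction m, hm using Int.le_induction with
  | base =>
      rw [PySem.List.pyRange_one_eq_nil (le_refl i)]
      simp [pvSmn_empty g (by omega : i - 1 < i), pvSmx_empty g (by omega : i - 1 < i)]
  | succ n hn ih =>
      rw [PySem.List.pyRange_one_succ_right hn, List.foldl_append, List.foldl_append, ih]
      simp only [List.foldl_cons, List.foldl_nil, add_sub_cancel_right]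
      exact pvStep_char g N i _ hn

theorem pvOuterStep_char (g : Int → Int) (N : Int) (res : Option Int) (i : Int) :
    pvOuterStep g N res i = (PySem.List.pyRange i N 1).foldl (pvCStep g N i) res := by
  unfold pvOuterStep
  by_cases h : i ≤ N
  · rw [pvInner_char g N i res N h]
  · rw [PySem.List.pyRange_one_eq_nil (by omega : N ≤ i)]
    rfl

theorem pvFoldl_flatMap {α β γ : Type} (l : List α) (f : α → List β) (F : γ → β → γ) (init : γ) :
    (l.flatMap f).foldl F init = l.foldl (fun a x => (f x).foldl F a) init := by
  induction l generalizing init with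
  | nil => rfl
  | cons x t ih => simp [List.flatMap_cons, List.foldl_append, ih]

-- A's whole double loop = one optional-min fold over all segments
theorem pvTotal_char (g : Int → Int) (N : Int) :
    (PySem.List.pyRange 0 N 1).foldl (pvOuterStep g N) none =
      (pvPairs N).foldl (pvF g N) none := by
  have hfun : pvOuterStep g N =
      fun res i => (PySem.List.pyRange i N 1).foldl (pvCStep g N i) res :=
    funext fun res => funext fun i => pvOuterStep_char g N res i
  rw [hfun]
  unfold pvPairs
  rw [pvFoldl_flatMap]
  congr 1
  funext a i
  rw [List.foldl_map]
  rfl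

theorem mem_pvPairs {N : Int} {p : Int × Int} :
    p ∈ pvPairs N ↔ 0 ≤ p.1 ∧ p.1 ≤ p.2 ∧ p.2 < N := by
  obtain ⟨i, j⟩ := p
  simp only [pvPairs, List.mem_flatMap, List.mem_map, PySem.List.mem_pyRange_one]
  constructor
  · rintro ⟨a, ⟨ha1, ha2⟩, b, ⟨hb1, hb2⟩, heq⟩
    obtain ⟨rfl, rfl⟩ := Prod.mk.injEq .. ▸ heq
    · exact ⟨ha1, hb1, hb2⟩
  · rintro ⟨h1, h2, h3⟩
    exact ⟨i, ⟨h1, by omega⟩, j, ⟨h2, h3⟩, rfl⟩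

-- generic facts about an optional-min fold
theorem pvFold_attain {α : Type} (P : α → Bool) (v : α → Int) (L : List α) :
    ∀ (r0 : Option Int) (r : Int),
      L.foldl (fun r x => if P x then pvOptMin r (v x) else r) r0 = some r →
      r0 = some r ∨ ∃ x ∈ L, P x = true ∧ v x = r := by
  induction L with
  | nil => intro r0 r h; exact Or.inl h
  | cons y t ih =>
      intro r0 r h
      simp only [List.foldl_cons] at h
      rcases ih _ r h with h1 | ⟨x, hx, hPx, hvx⟩
      · by_cases hPy : P y = true
        · rw [hPy] at h1
          simp only [if_true] at h1
          cases r0 with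
          | none =>
              simp at h1
              exact Or.inr ⟨y, List.mem_cons_self .., hPy, h1⟩
          | some z =>
              simp at h1
              rcases min_choice z (v y) with hm | hm
              · exact Or.inl (by rw [← h1, hm])
              · exact Or.inr ⟨y, List.mem_cons_self .., hPy, by omega⟩
        · simp only [hPy] at h1
          exact Or.inl h1
      · exact Or.inr ⟨x, List.mem_cons_of_mem y hx, hPx, hvx⟩

theorem pvFold_persist {α : Type} (P : α → Bool) (v : α → Int) (L : List α) :
    ∀ (m : Int), ∃ r, L.foldl (fun r x => if P x then pvOptMin r (v x) else r) (some m) = some r ∧ r ≤ m := by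
  induction L with
  | nil => intro m; exact ⟨m, rfl, le_refl m⟩
  | cons y t ih =>
      intro m
      by_cases hPy : P y = true
      · rcases ih (min m (v y)) with ⟨r, hr, hle⟩
        refine ⟨r, ?_, by omega⟩
        simpa [hPy] using hr
      · rcases ih m with ⟨r, hr, hle⟩
        refine ⟨r, ?_, hle⟩
        simpa [hPy] using hr

theorem pvFold_bound {α : Type} (P : α → Bool) (v : α → Int) (L : List α) :
    ∀ (r0 : Option Int) (x : α), x ∈ L → P x = true →
      ∃ r, L.foldl (fun r x => if P x then pvOptMin r (v x) else r) r0 = some r ∧ r ≤ v x := by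
  induction L with
  | nil => intro r0 x hx; exact absurd hx (List.not_mem_nil)
  | cons y t ih =>
      intro r0 x hx hPx
      rcases List.mem_cons.1 hx with rfl | hx'
      · simp only [List.foldl_cons, hPx, if_true]
        cases r0 with
        | none =>
            rcases pvFold_persist P v t (v x) with ⟨r, hr, hle⟩
            exact ⟨r, by simpa using hr, hle⟩
        | some z =>
            rcases pvFold_persist P v t (min z (v x)) with ⟨r, hr, hle⟩
            exact ⟨r, by simpa using hr, by omega⟩
      · exact ih _ x hx' hPx

theorem pvFold_skip {α : Type} (P : α → Bool) (v : α → Int) (L : List α)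
    (h : ∀ x ∈ L, P x = false) :
    ∀ r0, L.foldl (fun r x => if P x then pvOptMin r (v x) else r) r0 = r0 := by
  induction L with
  | nil => intro r0; rfl
  | cons y t ih =>
      intro r0
      have hy := h y (List.mem_cons_self ..)
      simp only [List.foldl_cons, hy]
      exact ih (fun x hx => h x (List.mem_cons_of_mem y hx)) r0

-- B's two loops, read off the port
theorem pvAdj_any (g : Int → Int) (N : Int) :
    ((PySem.List.pyRange 0 (N-1) 1).any (fun i => decide (|g i - g (i+1)| ≤ 1)) = true)
      ↔ pvAdj g N := by
  simp only [List.any_eq_true, PySem.List.mem_pyRange_one, decide_eq_true_eq, pvAdj]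
  exact exists_congr fun i => by tauto

theorem pvExt_any (g : Int → Int) (N : Int) :
    ((PySem.List.pyRange 0 (N-2) 1).any
        (fun i => decide (g i < g (i+1)) != decide (g (i+1) < g (i+2))) = true)
      ↔ pvExt g N := by
  simp only [List.any_eq_true, PySem.List.mem_pyRange_one, bne_iff_ne, ne_eq,
    decide_eq_decide, pvExt]
  exact exists_congr fun i => by tauto

theorem solve_alt_zero (N : Int) (A : List Int)
    (h : pvAdj (fun k => PySem.List.pyGetD A k 0) N) : solve_alt N A = 0 := by
  simp only [solve_alt]
  rw [if_pos ((pvAdj_any (fun k => PySem.List.pyGetD A k 0) N).mpr h)]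

theorem solve_alt_one (N : Int) (A : List Int)
    (h1 : ¬ pvAdj (fun k => PySem.List.pyGetD A k 0) N)
    (h2 : pvExt (fun k => PySem.List.pyGetD A k 0) N) : solve_alt N A = 1 := by
  simp only [solve_alt]
  rw [if_neg (fun hh => h1 ((pvAdj_any (fun k => PySem.List.pyGetD A k 0) N).mp hh)),
    if_pos ((pvExt_any (fun k => PySem.List.pyGetD A k 0) N).mpr h2)]

theorem solve_alt_neg (N : Int) (A : List Int)
    (h1 : ¬ pvAdj (fun k => PySem.List.pyGetD A k 0) N)
    (h2 : ¬ pvExt (fun k => PySem.List.pyGetD A k 0) N) : solve_alt N A = -1 := by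
  simp only [solve_alt]
  rw [if_neg (fun hh => h1 ((pvAdj_any (fun k => PySem.List.pyGetD A k 0) N).mp hh)),
    if_neg (fun hh => h2 ((pvExt_any (fun k => PySem.List.pyGetD A k 0) N).mp hh))]

-- the zero-cost segments are exactly the adjacent-within-1 pairs
theorem cond_diag_iff (g : Int → Int) (N : Int) {i : Int} :
    pvCondb g N i i = true ↔
      ((i ≠ 0 ∧ |g (i-1) - g i| ≤ 1) ∨ (i + 1 < N ∧ |g i - g (i+1)| ≤ 1)) := by
  unfold pvCondb
  simp only [decide_eq_true_eq, pvSmn_self, pvSmx_self, abs_le]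
  constructor <;> rintro (⟨u1, u2⟩ | ⟨u1, u2⟩)
  · exact Or.inl ⟨u1, by omega⟩
  · exact Or.inr ⟨u1, by omega⟩
  · exact Or.inl ⟨u1, by omega⟩
  · exact Or.inr ⟨u1, by omega⟩

theorem adj_of_cond_diag (g : Int → Int) (N : Int) {i : Int} (h0 : 0 ≤ i) (hN : i < N)
    (hc : pvCondb g N i i = true) : pvAdj g N := by
  rcases (cond_diag_iff g N).1 hc with ⟨h1, h2⟩ | ⟨h1, h2⟩
  · refine ⟨i - 1, by omega, by omega, ?_⟩
    have e : i - 1 + 1 = i := by ring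
    rw [e]; exact h2
  · exact ⟨i, h0, by omega, h2⟩

theorem cond_diag_of_adj (g : Int → Int) (N : Int) (h : pvAdj g N) :
    ∃ i, 0 ≤ i ∧ i < N ∧ pvCondb g N i i = true := by
  obtain ⟨i, h1, h2, h3⟩ := h
  refine ⟨i + 1, by omega, by omega, (cond_diag_iff g N).2 (Or.inl ⟨by omega, ?_⟩)⟩
  have e : i + 1 - 1 = i := by ring
  rw [e]; exact h3

-- a direction change yields a mergeable length-2 segment
theorem cond_pair_of_ext (g : Int → Int) (N : Int)
    (hnadj : ¬ pvAdj g N) (hext : pvExt g N) :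
    ∃ i j, 0 ≤ i ∧ i ≤ j ∧ j < N ∧ j - i = 1 ∧ pvCondb g N i j = true := by
  obtain ⟨i, h0, hN2, hiff⟩ := hext
  have gap2 : ∀ k, 0 ≤ k → k < N - 1 → g k + 2 ≤ g (k+1) ∨ g (k+1) + 2 ≤ g k := by
    intro k hk1 hk2
    by_contra h
    exact hnadj ⟨k, hk1, hk2, by rw [abs_le]; omega⟩
  have e12 : i + 1 + 1 = i + 2 := by ring
  have hab := gap2 i h0 (by omega)
  have hbc := gap2 (i+1) (by omega) (by omega)
  rw [e12] at hbc
  by_cases hab' : g i < g (i+1)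
  · have hcb : ¬ g (i+1) < g (i+2) := hiff.1 hab'
    by_cases hac : g i ≤ g (i+2)
    · -- local max, left side lower: merge (i, i+1), right neighbour i+2
      refine ⟨i, i + 1, h0, by omega, by omega, by ring, ?_⟩
      refine decide_eq_true (Or.inr ⟨by omega, ?_⟩)
      rw [pvSmn_pair, pvSmx_pair, e12]
      omega
    · -- right side lower: merge (i+1, i+2), left neighbour i
      refine ⟨i + 1, i + 2, by omega, by omega, by omega, by ring, ?_⟩
      refine decide_eq_true (Or.inl ⟨by omega, ?_⟩)
      have ep : i + 2 = (i + 1) + 1 := by ring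
      have em : (i + 1) - 1 = i := by ring
      rw [ep, pvSmn_pair, pvSmx_pair, ← ep, em]
      omega
  · have hbc' : g (i+1) < g (i+2) := by
      by_contra h
      exact hab' (hiff.2 h)
    by_cases hac : g i ≤ g (i+2)
    · -- local min, left side lower: merge (i+1, i+2), left neighbour i
      refine ⟨i + 1, i + 2, by omega, by omega, by omega, by ring, ?_⟩
      refine decide_eq_true (Or.inl ⟨by omega, ?_⟩)
      have ep : i + 2 = (i + 1) + 1 := by ring
      have em : (i + 1) - 1 = i := by ring
      rw [ep, pvSmn_pair, pvSmx_pair, ← ep, em]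
      omega
    · -- right side lower: merge (i, i+1), right neighbour i+2
      refine ⟨i, i + 1, h0, by omega, by omega, by ring, ?_⟩
      refine decide_eq_true (Or.inr ⟨by omega, ?_⟩)
      rw [pvSmn_pair, pvSmx_pair, e12]
      omega

-- no direction change: every consecutive step goes the same way as the first
theorem pvDir (g : Int → Int) (N : Int) (hnext : ¬ pvExt g N) :
    ∀ k, 0 ≤ k → k < N - 1 → ((g k < g (k+1)) ↔ (g 0 < g 1)) := by
  intro k hk
  induction k, hk using Int.le_induction with
  | base => intro _; norm_num
  | succ n hn ih =>
      intro h
      have hstepIff : (g n < g (n+1)) ↔ (g (n+1) < g (n+2)) := by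
        by_contra hcon
        exact hnext ⟨n, hn, by omega, by tauto⟩
      have e : n + 1 + 1 = n + 2 := by ring
      rw [e]
      exact (hstepIff.symm).trans (ih (by omega))

theorem pvMonoUp (g : Int → Int) (N : Int)
    (hstep : ∀ k, 0 ≤ k → k < N - 1 → g k + 2 ≤ g (k+1)) :
    ∀ k l, 0 ≤ k → k ≤ l → l < N → g k ≤ g l := by
  intro k l hk hkl
  induction l, hkl using Int.le_induction with
  | base => intro _; exact le_refl _
  | succ n hn ih =>
      intro h
      have h1 := ih (by omega)
      have h2 := hstep n (by omega) (by omega)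
      omega

-- strictly monotone with gaps ≥ 2: no segment is ever mergeable
theorem no_cond_of_mono (g : Int → Int) (N : Int)
    (hnadj : ¬ pvAdj g N) (hnext : ¬ pvExt g N) :
    ∀ i j, 0 ≤ i → i ≤ j → j < N → pvCondb g N i j = false := by
  intro i j h0 hij hjN
  rw [Bool.eq_false_iff]
  intro hc
  have gap2 : ∀ k, 0 ≤ k → k < N - 1 → g k + 2 ≤ g (k+1) ∨ g (k+1) + 2 ≤ g k := by
    intro k hk1 hk2
    by_contra h
    exact hnadj ⟨k, hk1, hk2, by rw [abs_le]; omega⟩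
  unfold pvCondb at hc
  simp only [decide_eq_true_eq] at hc
  -- either branch of the condition forces N ≥ 2, so g 0 < g 1 or g 1 < g 0 (gap ≥ 2)
  have hN2 : 2 ≤ N := by rcases hc with ⟨h1, _⟩ | ⟨h1, _⟩ <;> omega
  by_cases hd : g 0 < g 1
  · -- strictly increasing, each step by ≥ 2
    have hstep : ∀ k, 0 ≤ k → k < N - 1 → g k + 2 ≤ g (k+1) := by
      intro k hk1 hk2
      have hdir := (pvDir g N hnext k hk1 hk2).2 hd
      rcases gap2 k hk1 hk2 with h | h
      · exact h
      · omega
    have hmono := pvMonoUp g N hstep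
    rcases hc with ⟨h1, h2⟩ | ⟨h1, h2⟩
    · obtain ⟨k, hk1, hk2, hkeq⟩ := pvSmn_mem g hij
      have hik : g i ≤ g k := hmono i k h0 hk1 (by omega)
      have hstepi : g (i-1) + 2 ≤ g i := by
        have := hstep (i-1) (by omega) (by omega)
        have e : i - 1 + 1 = i := by ring
        rw [e] at this
        exact this
      omega
    · obtain ⟨k, hk1, hk2, hkeq⟩ := pvSmx_mem g hij
      have hkj : g k ≤ g j := hmono k j (by omega) hk2 hjN
      have hstepj : g j + 2 ≤ g (j+1) := hstep j (by omega) (by omega)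
      omega
  · -- strictly decreasing: apply the increasing case to -g
    have hstep : ∀ k, 0 ≤ k → k < N - 1 → g (k+1) + 2 ≤ g k := by
      intro k hk1 hk2
      have hdir := pvDir g N hnext k hk1 hk2
      rcases gap2 k hk1 hk2 with h | h
      · exact absurd (hdir.1 (by omega)) hd
      · exact h
    have hmono : ∀ k l, 0 ≤ k → k ≤ l → l < N → g l ≤ g k := by
      intro k l hk hkl hlN
      have := pvMonoUp (fun t => - g t) N (fun t ht1 ht2 => by
        have := hstep t ht1 ht2
        simp only
        omega) k l hk hkl hlN
      simp only at this
      omega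
    rcases hc with ⟨h1, h2⟩ | ⟨h1, h2⟩
    · obtain ⟨k, hk1, hk2, hkeq⟩ := pvSmx_mem g hij
      have hik : g k ≤ g i := hmono i k h0 hk1 (by omega)
      have hstepi : g i + 2 ≤ g (i-1) := by
        have := hstep (i-1) (by omega) (by omega)
        have e : i - 1 + 1 = i := by ring
        rw [e] at this
        exact this
      omega
    · obtain ⟨k, hk1, hk2, hkeq⟩ := pvSmn_mem g hij
      have hkj : g j ≤ g k := hmono k j (by omega) hk2 hjN
      have hstepj : g (j+1) + 2 ≤ g j := hstep j (by omega) (by omega)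
      omega

-- ===== VERDICT (by name: the statement is the Claim_ definition above) =====
theorem solve_spec : Claim_equal_solve := by
  intro N A _ _
  unfold Spec_solve
  simp only [solve]
  rw [pvTotal_char (fun k => PySem.List.pyGetD A k 0) N]
  set g := fun k => PySem.List.pyGetD A k 0 with hg
  have hfold : (pvPairs N).foldl (pvF g N) none =
      (pvPairs N).foldl
        (fun r (p : Int × Int) => if (fun p : Int × Int => pvCondb g N p.1 p.2) p
          then pvOptMin r ((fun p : Int × Int => p.2 - p.1) p) else r) none := rfl
  by_cases hA : pvAdj g N
  · -- answer 0
    obtain ⟨i, hi1, hi2, hc⟩ := cond_diag_of_adj g N hA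
    obtain ⟨r, hr, hle⟩ := pvFold_bound (fun p : Int × Int => pvCondb g N p.1 p.2)
      (fun p : Int × Int => p.2 - p.1) (pvPairs N) none (i, i)
      (mem_pvPairs.2 ⟨hi1, le_refl i, hi2⟩) hc
    have hle' : r ≤ 0 := by simpa using hle
    rcases pvFold_attain _ _ (pvPairs N) none r hr with hcon | ⟨p, hp, hPp, hvp⟩
    · simp at hcon
    · have hp' := mem_pvPairs.1 hp
      have hvp' : p.2 - p.1 = r := hvp
      have hr0 : r = 0 := by omega
      rw [hfold, hr, hr0, solve_alt_zero N A (by rw [← hg]; exact hA)]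
  · by_cases hE : pvExt g N
    · -- answer 1
      obtain ⟨i, j, h1, h2, h3, h4, hc⟩ := cond_pair_of_ext g N hA hE
      obtain ⟨r, hr, hle⟩ := pvFold_bound (fun p : Int × Int => pvCondb g N p.1 p.2)
        (fun p : Int × Int => p.2 - p.1) (pvPairs N) none (i, j)
        (mem_pvPairs.2 ⟨h1, h2, h3⟩) hc
      have hle' : r ≤ j - i := by simpa using hle
      rcases pvFold_attain _ _ (pvPairs N) none r hr with hcon | ⟨p, hp, hPp, hvp⟩
      · simp at hcon
      · have hp' := mem_pvPairs.1 hp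
        have hvp' : p.2 - p.1 = r := hvp
        have hne : p.1 ≠ p.2 := by
          intro heq
          apply hA
          have hc' : pvCondb g N p.1 p.1 = true := by
            have := hPp
            rw [← heq] at this
            exact this
          exact adj_of_cond_diag g N hp'.1 (by omega) hc'
        have hr1 : r = 1 := by omega
        rw [hfold, hr, hr1, solve_alt_one N A (by rw [← hg]; exact hA) (by rw [← hg]; exact hE)]
    · -- answer -1
      have hnone : (pvPairs N).foldl (pvF g N) none = none := by
        rw [hfold]
        exact pvFold_skip _ _ (pvPairs N) (fun p hp => by
          have h := mem_pvPairs.1 hp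
          exact no_cond_of_mono g N hA hE p.1 p.2 h.1 h.2.1 h.2.2) none
      rw [hnone, solve_alt_neg N A (by rw [← hg]; exact hA) (by rw [← hg]; exact hE)]
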